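-- pv_equiv track=rewrite | github.com/Millie-blip/Python_codes | Function_closetkey.py | closest_key
-- ===== SOURCE A (Python) =====
-- def closest_key(dictionary, value):
--     # Initialize variables to track the closest key and the smallest index
--     closest_key = None
--     smallest_index = float('inf')
--
--     # Iterate over each key-value pair in the dictionary
--     for key, letters_list in dictionary.items():
--         # Check if the value is in the current list
--         if value in letters_list:
--             # Find the index of the value in the current list
--             index = letters_list.index(value)
--             # Update the closest key if the current index is smaller
--             if index < smallest_index:
--                 smallest_index = index
--                 closest_key = key
--
--     return closest_key
-- ===== SOURCE B (Python) =====
-- def closest_key(dictionary, value):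
--     # Level-order scan: check index position 0 across all keys, then position 1, ...
--     # The first hit is by construction the key with the smallest index (dict-order tie-break).
--     max_len = max((len(lst) for lst in dictionary.values()), default=0)
--     for i in range(max_len):
--         for key, lst in dictionary.items():
--             if i < len(lst) and lst[i] == value:
--                 return key
--     return None
-- ===== Notes on version B (the rewrite author's own statement) =====
-- stated objective: alternative
-- what changed: Replaces the per-key running-minimum scan (value-in + .index per list) by a level-order traversal: scan index position 0 across all keys, then position 1, ..., returning on the first hit, which is the minimal index by construction with the same dict-order tie-break.
import Mathlib
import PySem

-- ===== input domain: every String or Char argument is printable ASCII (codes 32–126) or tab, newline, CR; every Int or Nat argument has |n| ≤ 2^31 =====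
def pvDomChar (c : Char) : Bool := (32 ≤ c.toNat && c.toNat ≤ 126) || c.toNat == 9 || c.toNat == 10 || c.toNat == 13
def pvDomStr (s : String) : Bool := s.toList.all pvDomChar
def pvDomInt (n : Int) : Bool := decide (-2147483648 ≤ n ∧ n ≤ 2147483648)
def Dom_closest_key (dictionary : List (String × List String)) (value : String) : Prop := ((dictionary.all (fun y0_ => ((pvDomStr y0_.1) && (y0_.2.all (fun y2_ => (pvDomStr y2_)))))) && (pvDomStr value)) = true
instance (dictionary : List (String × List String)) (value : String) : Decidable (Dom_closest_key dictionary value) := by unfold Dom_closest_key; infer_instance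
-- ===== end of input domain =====

-- B replaces A's per-key running-minimum scan by a level-order scan (position 0 over all
-- keys, then position 1, ...), returning on the first hit; same value, alternative algorithm.

-- ===== PORT A =====
-- one loop step of A: update (closest_key, smallest_index); smallest_index = none plays float('inf')
def stepA (value : String) (st : Option String × Option Nat) (kv : String × List String) :
    Option String × Option Nat :=
  if value ∈ kv.2 then
    match PySem.List.index? kv.2 value with
    | none => st
    | some i =>
      match st.2 with
      | none => (some kv.1, some i)
      | some s => if i < s then (some kv.1, some i) else st
  else st

def closest_key (dictionary : List (String × List String)) (value : String) : Option String :=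
  (dictionary.foldl (stepA value) (none, none)).1

-- ===== PORT B =====
-- Source B's inner loop over dictionary.items() at level i (first key with i < len(lst) and lst[i] == value)
def hitAt (value : String) (i : Nat) (kv : String × List String) : Bool :=
  decide (i < kv.2.length) && (kv.2.getD i "" == value)

-- Source B's outer loop: i runs over range(max_len); fuel = remaining levels
def altLoop (dictionary : List (String × List String)) (value : String) : Nat → Nat → Option String
  | _, 0 => none
  | i, fuel+1 =>
    match dictionary.find? (hitAt value i) with
    | some kv => some kv.1
    | none => altLoop dictionary value (i+1) fuel

def closest_key_alt (dictionary : List (String × List String)) (value : String) : Option String :=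
  let maxLen := dictionary.foldl (fun m kv => max m kv.2.length) 0
  altLoop dictionary value 0 maxLen

-- ===== PRECONDITION & SPEC =====
def Spec_closest_key (dictionary : List (String × List String)) (value : String) (out : Option String) : Prop := out = closest_key_alt dictionary value
instance (dictionary : List (String × List String)) (value : String) (out : Option String) : Decidable (Spec_closest_key dictionary value out) := by unfold Spec_closest_key; infer_instance

-- ===== CLAIM (what is proved, stated in full; the proofs are below) =====
def Claim_equal_closest_key : Prop := ∀ (dictionary : List (String × List String)) (value : String), Dom_closest_key dictionary value → Spec_closest_key dictionary value (closest_key dictionary value)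

-- ===== LEMMAS AND PROOFS =====

theorem hitAt_iff (value : String) (i : Nat) (kv : String × List String) :
    hitAt value i kv = true ↔ kv.2[i]? = some value := by
  unfold hitAt
  rcases kv with ⟨k, l⟩
  simp only [Bool.and_eq_true, decide_eq_true_eq, beq_iff_eq]
  constructor
  · rintro ⟨h, hv⟩
    rw [List.getElem?_eq_getElem h]
    simpa [List.getD, List.getElem?_eq_getElem h] using hv
  · intro h
    have hlt : i < l.length := by
      by_contra hge
      simp [List.getElem?_eq_none (by omega : l.length ≤ i)] at h
    refine ⟨hlt, ?_⟩
    rw [List.getElem?_eq_getElem hlt] at h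
    simp [List.getD, List.getElem?_eq_getElem hlt, Option.some_inj.mp h]

-- if value occurs nowhere, A's fold leaves the state unchanged
theorem foldA_id (value : String) :
    ∀ (d : List (String × List String)) (st : Option String × Option Nat),
      (∀ e ∈ d, value ∉ e.2) →
      List.foldl (stepA value) st d = st := by
  intro d
  induction d with
  | nil => intro st _; rfl
  | cons e t ih =>
    intro st h
    have he : value ∉ e.2 := h e (by simp)
    simp only [List.foldl_cons, stepA, if_neg he]
    exact ih st (fun x hx => h x (by simp [hx]))

-- once A holds index i and every remaining occurrence sits at position ≥ i, the state is final
theorem foldA_stuck (value : String) (k : String) (i : Nat) :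
    ∀ (d : List (String × List String)),
      (∀ e ∈ d, ∀ j, e.2[j]? = some value → i ≤ j) →
      List.foldl (stepA value) (some k, some i) d = (some k, some i) := by
  intro d
  induction d with
  | nil => intro _; rfl
  | cons e t ih =>
    intro h
    have hstep : stepA value (some k, some i) e = (some k, some i) := by
      unfold stepA
      by_cases hm : value ∈ e.2
      · rw [if_pos hm]
        have hs : (PySem.List.index? e.2 value).isSome := by
          rw [PySem.List.index?_isSome_iff]; exact hm
        rcases Option.isSome_iff_exists.mp hs with ⟨j, hj⟩
        rw [hj]
        obtain ⟨hjl, hjv, _⟩ := PySem.List.getElem_of_index?_eq_some hj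
        have : i ≤ j := h e (by simp) j (by rw [List.getElem?_eq_getElem hjl, hjv])
        simp [Nat.not_lt.mpr this]
      · rw [if_neg hm]
    rw [List.foldl_cons, hstep]
    exact ih (fun x hx => h x (by simp [hx]))

-- if no occurrence is below level i and kv is the first key hit at level i, A returns kv's key
theorem foldA_find (value : String) (i : Nat) :
    ∀ (d : List (String × List String)) (st : Option String × Option Nat),
      (∀ e ∈ d, ∀ j, e.2[j]? = some value → i ≤ j) →
      (st.2 = none ∨ ∃ m, st.2 = some m ∧ i < m) →
      ∀ kv, d.find? (hitAt value i) = some kv →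
      (List.foldl (stepA value) st d).1 = some kv.1 := by
  intro d
  induction d with
  | nil => intro st _ _ kv hkv; simp at hkv
  | cons e t ih =>
    intro st hocc hst kv hkv
    by_cases hp : hitAt value i e = true
    · -- e is the hit: kv = e, index? e.2 value = some i, state becomes (some e.1, some i)
      rw [List.find?_cons_of_pos hp] at hkv
      injection hkv with hkv; subst hkv
      have hei : e.2[i]? = some value := (hitAt_iff value i e).mp hp
      have hmem : value ∈ e.2 := List.mem_of_getElem? hei
      have hs : (PySem.List.index? e.2 value).isSome := by
        rw [PySem.List.index?_isSome_iff]; exact hmem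
      rcases Option.isSome_iff_exists.mp hs with ⟨j, hj⟩
      obtain ⟨hjl, hjv, hjmin⟩ := PySem.List.getElem_of_index?_eq_some hj
      have hij : i ≤ j := hocc e (by simp) j (by rw [List.getElem?_eq_getElem hjl, hjv])
      have hji : j = i := by
        by_contra hne
        have hil : i < e.2.length := by omega
        have := hjmin i (by omega)
        rw [List.getElem?_eq_getElem hil] at hei
        exact this (Option.some_inj.mp hei)
      subst hji
      have hstep : stepA value st e = (some e.1, some j) := by
        unfold stepA
        rw [if_pos hmem, hj]
        rcases hst with h0 | ⟨m, hm, him⟩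
        · rcases st with ⟨a, b⟩; simp at h0; subst h0; rfl
        · rcases st with ⟨a, b⟩; simp at hm; subst hm; simp [him]
      rw [List.foldl_cons, hstep,
        foldA_stuck value e.1 j t (fun x hx => hocc x (by simp [hx]))]
    · -- e is not hit at level i: the state invariant is preserved
      rw [List.find?_cons_of_neg hp] at hkv
      have hocc' : ∀ x ∈ t, ∀ j, x.2[j]? = some value → i ≤ j :=
        fun x hx => hocc x (by simp [hx])
      rw [List.foldl_cons]
      refine ih (stepA value st e) hocc' ?_ kv hkv
      unfold stepA
      by_cases hm : value ∈ e.2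
      · rw [if_pos hm]
        have hs : (PySem.List.index? e.2 value).isSome := by
          rw [PySem.List.index?_isSome_iff]; exact hm
        rcases Option.isSome_iff_exists.mp hs with ⟨j, hj⟩
        obtain ⟨hjl, hjv, _⟩ := PySem.List.getElem_of_index?_eq_some hj
        have hij : i ≤ j := hocc e (by simp) j (by rw [List.getElem?_eq_getElem hjl, hjv])
        have hji : j ≠ i := by
          intro h; subst h
          exact hp ((hitAt_iff value j e).mpr (by rw [List.getElem?_eq_getElem hjl, hjv]))
        rw [hj]
        rcases hst with h0 | ⟨m, hm2, him⟩
        · rcases st with ⟨a, b⟩; simp at h0; subst h0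
          exact Or.inr ⟨j, rfl, by omega⟩
        · rcases st with ⟨a, b⟩; simp at hm2; subst hm2
          by_cases hjm : j < m
          · simp only [if_pos hjm]; exact Or.inr ⟨j, rfl, by omega⟩
          · simp only [if_neg hjm]; exact Or.inr ⟨m, rfl, him⟩
      · rw [if_neg hm]; exact hst

-- every list length is bounded by the running max
theorem len_le_foldMax :
    ∀ (d : List (String × List String)) (m : Nat),
      (m ≤ d.foldl (fun m kv => max m kv.2.length) m) ∧
      (∀ e ∈ d, e.2.length ≤ d.foldl (fun m kv => max m kv.2.length) m) := by
  intro d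
  induction d with
  | nil => intro m; exact ⟨le_refl m, by simp⟩
  | cons e t ih =>
    intro m
    rcases ih (max m e.2.length) with ⟨h1, h2⟩
    refine ⟨le_trans (le_max_left _ _) h1, ?_⟩
    intro x hx
    rcases List.mem_cons.mp hx with h | h
    · subst h; exact le_trans (le_max_right _ _) h1
    · exact h2 x h

-- main: the level scan from level i with enough fuel computes A's fold result,
-- provided no occurrence of value sits below level i
theorem altLoop_eq (d : List (String × List String)) (value : String) :
    ∀ (fuel i : Nat),
      (∀ e ∈ d, e.2.length ≤ i + fuel) →
      (∀ e ∈ d, ∀ j, e.2[j]? = some value → i ≤ j) →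
      altLoop d value i fuel = (List.foldl (stepA value) (none, none) d).1 := by
  intro fuel
  induction fuel with
  | zero =>
    intro i hlen hocc
    have hnone : ∀ e ∈ d, value ∉ e.2 := by
      intro e he hm
      rcases List.getElem_of_mem hm with ⟨j, hj, hv⟩
      have : i ≤ j := hocc e he j (by rw [List.getElem?_eq_getElem hj, hv])
      have := hlen e he
      omega
    rw [foldA_id value d (none, none) hnone]
    rfl
  | succ n ih =>
    intro i hlen hocc
    show (match d.find? (hitAt value i) with
          | some kv => some kv.1
          | none => altLoop d value (i+1) n) = _
    cases hfind : d.find? (hitAt value i) with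
    | some kv =>
      simp only []
      exact (foldA_find value i d (none, none) hocc (Or.inl rfl) kv hfind).symm
    | none =>
      simp only []
      refine ih (i+1) (fun e he => by have := hlen e he; omega) ?_
      intro e he j hj
      have hi := hocc e he j hj
      rcases Nat.lt_or_ge i j with h | h
      · omega
      · exfalso
        have hji : j = i := by omega
        subst hji
        have := List.find?_eq_none.mp hfind e he
        exact this ((hitAt_iff value j e).mpr hj)

-- ===== VERDICT (by name: the statement is the Claim_ definition above) =====
theorem closest_key_spec : Claim_equal_closest_key := by
  intro dictionary value _
  show closest_key dictionary value = closest_key_alt dictionary value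
  unfold closest_key closest_key_alt
  exact (altLoop_eq dictionary value _ 0
    (fun e he => by simpa using (len_le_foldMax dictionary 0).2 e he)
    (fun e _ j _ => Nat.zero_le j)).symm
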